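-- pv_equiv track=rewrite | github.com/siakhooi/codility-jurassic-code-2022 | codility-solutions/solution-1.py | solution
-- ===== SOURCE A (Python) =====
-- def solution(X, Y, colors):
--     n = len(X)
--     ans = 0
--     for i in range(n):
--         r2 = X[i]**2 + Y[i]**2
--         cnt = red = 0
--         for j in range(n):
--             if X[j]**2 + Y[j]**2 <= r2:
--                 cnt += 1
--                 red += colors[j] == 'R'
--         if red*2 == cnt:
--             ans = max(ans, cnt)
--     return ans
-- ===== SOURCE B (Python) =====
-- def solution(X, Y, colors):
--     # Sort points by squared distance once, then a single prefix scan; a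
--     # candidate radius ends at the last point of each tie-group.
--     pts = sorted(((x * x + y * y, c == 'R') for x, y, c in zip(X, Y, colors)),
--                  key=lambda p: p[0])
--     n = len(pts)
--     ans = cnt = red = 0
--     for k in range(n):
--         d2, r = pts[k]
--         cnt += 1
--         red += r
--         if (k + 1 == n or pts[k + 1][0] != d2) and red * 2 == cnt:
--             ans = max(ans, cnt)
--     return ans
-- ===== Notes on version B (the rewrite author's own statement) =====
-- stated objective: faster
-- what changed: Replaces the nested quadratic scan (for each point, re-count all points inside its radius) by sorting points by squared distance once and doing a single prefix scan that evaluates each distinct radius at the end of its tie-group.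
import Mathlib
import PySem

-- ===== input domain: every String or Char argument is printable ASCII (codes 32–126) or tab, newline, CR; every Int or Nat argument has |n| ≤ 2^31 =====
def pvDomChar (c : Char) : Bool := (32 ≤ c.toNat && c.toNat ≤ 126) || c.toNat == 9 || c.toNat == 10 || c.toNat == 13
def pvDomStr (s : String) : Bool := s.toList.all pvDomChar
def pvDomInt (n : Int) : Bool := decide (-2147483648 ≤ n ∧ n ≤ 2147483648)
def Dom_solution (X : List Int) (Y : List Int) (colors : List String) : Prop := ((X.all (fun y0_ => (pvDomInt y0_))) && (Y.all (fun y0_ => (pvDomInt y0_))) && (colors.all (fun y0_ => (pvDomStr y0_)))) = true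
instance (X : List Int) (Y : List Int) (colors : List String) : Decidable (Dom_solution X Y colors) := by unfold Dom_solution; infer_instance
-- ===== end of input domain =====

-- B sorts the points by squared distance once and does one prefix scan (one check per tie-group)
-- instead of A's quadratic nested re-count; equivalence of the return values is proved below.

-- ===== PORT A =====
-- inner 'for j in range(n)' loop of A: returns (cnt, red)
def solutionInner (X : List Int) (Y : List Int) (colors : List String) (n : Int) (r2 : Int) : Int × Int :=
  (PySem.List.pyRange 0 n 1).foldl (fun (p : Int × Int) j =>
    if (PySem.List.pyGetD X j 0) ^ 2 + (PySem.List.pyGetD Y j 0) ^ 2 ≤ r2 then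
      (p.1 + 1, p.2 + (if PySem.List.pyGetD colors j "" = "R" then 1 else 0))
    else p) (0, 0)

def solution (X : List Int) (Y : List Int) (colors : List String) : Int :=
  let n : Int := X.length
  (PySem.List.pyRange 0 n 1).foldl (fun ans i =>
    let r2 := (PySem.List.pyGetD X i 0) ^ 2 + (PySem.List.pyGetD Y i 0) ^ 2
    let cr := solutionInner X Y colors n r2
    if cr.2 * 2 = cr.1 then max ans cr.1 else ans) 0

-- ===== PORT B =====
-- the points as (squared distance, is-red) pairs, from zip(X, Y, colors)
def pairsB (X : List Int) (Y : List Int) (colors : List String) : List (Int × Bool) :=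
  (X.zip (Y.zip colors)).map (fun t => (t.1 * t.1 + t.2.1 * t.2.1, t.2.2 == "R"))

-- B's prefix scan over the sorted pairs (rest-head lookahead = pts[k+1][0] in Source B)
def goB : List (Int × Bool) → Int → Int → Int → Int
  | [], _, _, ans => ans
  | p :: r, cnt, red, ans =>
    let cnt' := cnt + 1
    let red' := red + (if p.2 then 1 else 0)
    let boundary : Bool := match r with | [] => true | q :: _ => decide (q.1 ≠ p.1)
    goB r cnt' red' (if boundary ∧ red' * 2 = cnt' then max ans cnt' else ans)

def solution_alt (X : List Int) (Y : List Int) (colors : List String) : Int :=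
  goB (PySem.List.sorted (pairsB X Y colors) (fun p => p.1) false) 0 0 0

-- ===== PRECONDITION & SPEC =====
-- A indexes Y[j] and colors[j] for every j < len(X): it raises IndexError iff Y or colors is shorter than X.
def Pre_solution (X : List Int) (Y : List Int) (colors : List String) : Prop :=
  X.length ≤ Y.length ∧ X.length ≤ colors.length
instance (X : List Int) (Y : List Int) (colors : List String) : Decidable (Pre_solution X Y colors) := by unfold Pre_solution; infer_instance
def pvWitness_solution : List Int × List Int × List String := ([0, 1], [0, 0], ["R", "B"])


def Spec_solution (X : List Int) (Y : List Int) (colors : List String) (out : Int) : Prop := out = solution_alt X Y colors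
instance (X : List Int) (Y : List Int) (colors : List String) (out : Int) : Decidable (Spec_solution X Y colors out) := by unfold Spec_solution; infer_instance

-- ===== CLAIM (what is proved, stated in full; the proofs are below) =====
def Claim_equal_solution : Prop := ∀ (X : List Int) (Y : List Int) (colors : List String), Dom_solution X Y colors → Pre_solution X Y colors → Spec_solution X Y colors (solution X Y colors)

-- ===== LEMMAS AND PROOFS =====

-- number of pairs with squared distance ≤ v / red such pairs
def cntF (v : Int) (l : List (Int × Bool)) : Int := (l.countP (fun p => decide (p.1 ≤ v)) : Int)
def redF (v : Int) (l : List (Int × Bool)) : Int := (l.countP (fun p => decide (p.1 ≤ v) && p.2) : Int)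
-- contribution of candidate radius v to the answer
def contribF (l : List (Int × Bool)) (v : Int) : Int := if redF v l * 2 = cntF v l then cntF v l else 0
-- running maximum of contributions
def MX (l : List (Int × Bool)) (a : Int) (vs : List Int) : Int :=
  vs.foldl (fun a v => max a (contribF l v)) a

theorem pairsB_length (X : List Int) (Y : List Int) (colors : List String)
    (h : Pre_solution X Y colors) : (pairsB X Y colors).length = X.length := by
  obtain ⟨h1, h2⟩ := h
  simp [pairsB]
  omega

theorem pairsB_getElem (X : List Int) (Y : List Int) (colors : List String)
    (m : Nat) (hx : m < X.length) (hy : m < Y.length) (hc : m < colors.length) :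
    (pairsB X Y colors)[m]'(by simp [pairsB]; omega)
      = (X[m] * X[m] + Y[m] * Y[m], colors[m] == "R") := by
  simp [pairsB, List.getElem_zip]





theorem innerAux (X : List Int) (Y : List Int) (colors : List String)
    (h : Pre_solution X Y colors) (v : Int) :
    ∀ m : Nat, m ≤ X.length →
      (PySem.List.pyRange 0 (m : Int) 1).foldl (fun (p : Int × Int) j =>
        if (PySem.List.pyGetD X j 0) ^ 2 + (PySem.List.pyGetD Y j 0) ^ 2 ≤ v then
          (p.1 + 1, p.2 + (if PySem.List.pyGetD colors j "" = "R" then 1 else 0))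
        else p) (0, 0)
      = (cntF v ((pairsB X Y colors).take m), redF v ((pairsB X Y colors).take m)) := by
  intro m hm
  induction m with
  | zero => simp [PySem.List.pyRange_one_eq_nil, cntF, redF]
  | succ m ih =>
      obtain ⟨h1, h2⟩ := h
      have hm' : m ≤ X.length := by omega
      have hx : m < X.length := by omega
      have hy : m < Y.length := by omega
      have hc : m < colors.length := by omega
      have hL : m < (pairsB X Y colors).length := by
        rw [pairsB_length X Y colors ⟨h1, h2⟩]; omega
      have hcast : ((m + 1 : Nat) : Int) = (m : Int) + 1 := by push_cast; ring
      rw [hcast, PySem.List.pyRange_one_succ_right (by positivity), List.foldl_append]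
      rw [ih hm']
      have htake : (pairsB X Y colors).take (m + 1)
          = (pairsB X Y colors).take m ++ [(pairsB X Y colors)[m]] := by
        rw [List.take_succ, List.getElem?_eq_getElem hL]; rfl
      rw [htake, pairsB_getElem X Y colors m hx hy hc]
      have hgx : PySem.List.pyGetD X (m : Int) 0 = X[m] := by
        simp [PySem.List.pyGetD_natCast, List.getD_eq_getElem?_getD, List.getElem?_eq_getElem hx]
      have hgy : PySem.List.pyGetD Y (m : Int) 0 = Y[m] := by
        simp [PySem.List.pyGetD_natCast, List.getD_eq_getElem?_getD, List.getElem?_eq_getElem hy]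
      have hgc : PySem.List.pyGetD colors (m : Int) "" = colors[m] := by
        simp [PySem.List.pyGetD_natCast, List.getD_eq_getElem?_getD, List.getElem?_eq_getElem hc]
      simp only [List.foldl_cons, List.foldl_nil, hgx, hgy, hgc, cntF, redF,
        List.countP_append, List.countP_cons, List.countP_nil]
      have hsq : X[m] ^ 2 + Y[m] ^ 2 = X[m] * X[m] + Y[m] * Y[m] := by ring
      rw [hsq]
      by_cases hle : X[m] * X[m] + Y[m] * Y[m] ≤ v
      · simp only [if_pos hle]
        by_cases hr : colors[m] = "R" <;>
          simp [hle, hr, Prod.ext_iff] <;> push_cast <;> ring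
      · simp [hle]

theorem inner_eq (X : List Int) (Y : List Int) (colors : List String)
    (h : Pre_solution X Y colors) (v : Int) :
    solutionInner X Y colors (X.length : Int) v
      = (cntF v (pairsB X Y colors), redF v (pairsB X Y colors)) := by
  have := innerAux X Y colors h v X.length le_rfl
  unfold solutionInner
  rw [this]
  have hlen : (pairsB X Y colors).length = X.length := pairsB_length X Y colors h
  rw [← hlen, List.take_length]

-- A's outer loop written as a fold of contribution-maxima
def FA (l : List (Int × Bool)) (a : Int) (vs : List Int) : Int :=
  vs.foldl (fun a v => if redF v l * 2 = cntF v l then max a (cntF v l) else a) a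

theorem outerAux (X : List Int) (Y : List Int) (colors : List String)
    (h : Pre_solution X Y colors) :
    ∀ m : Nat, m ≤ X.length →
      (PySem.List.pyRange 0 (m : Int) 1).foldl (fun ans i =>
        let r2 := (PySem.List.pyGetD X i 0) ^ 2 + (PySem.List.pyGetD Y i 0) ^ 2
        let cr := solutionInner X Y colors (X.length : Int) r2
        if cr.2 * 2 = cr.1 then max ans cr.1 else ans) 0
      = FA (pairsB X Y colors) 0 (((pairsB X Y colors).take m).map (fun p => p.1)) := by
  intro m hm
  induction m with
  | zero => simp [PySem.List.pyRange_one_eq_nil, FA]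
  | succ m ih =>
      obtain ⟨h1, h2⟩ := h
      have hm' : m ≤ X.length := by omega
      have hx : m < X.length := by omega
      have hy : m < Y.length := by omega
      have hc : m < colors.length := by omega
      have hL : m < (pairsB X Y colors).length := by
        rw [pairsB_length X Y colors ⟨h1, h2⟩]; omega
      have hcast : ((m + 1 : Nat) : Int) = (m : Int) + 1 := by push_cast; ring
      rw [hcast, PySem.List.pyRange_one_succ_right (by positivity), List.foldl_append]
      rw [ih hm']
      have htake : (pairsB X Y colors).take (m + 1)
          = (pairsB X Y colors).take m ++ [(pairsB X Y colors)[m]] := by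
        rw [List.take_succ, List.getElem?_eq_getElem hL]; rfl
      rw [htake, pairsB_getElem X Y colors m hx hy hc]
      have hgx : PySem.List.pyGetD X (m : Int) 0 = X[m] := by
        simp [PySem.List.pyGetD_natCast, List.getD_eq_getElem?_getD, List.getElem?_eq_getElem hx]
      have hgy : PySem.List.pyGetD Y (m : Int) 0 = Y[m] := by
        simp [PySem.List.pyGetD_natCast, List.getD_eq_getElem?_getD, List.getElem?_eq_getElem hy]
      have hsq : X[m] ^ 2 + Y[m] ^ 2 = X[m] * X[m] + Y[m] * Y[m] := by ring
      simp only [List.foldl_cons, List.foldl_nil, hgx, hgy, FA, List.map_append,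
        List.foldl_append, List.map_cons, List.map_nil, hsq]
      rw [inner_eq X Y colors ⟨h1, h2⟩]

theorem FA_eq_MX (l : List (Int × Bool)) :
    ∀ (vs : List Int) (a : Int), 0 ≤ a → FA l a vs = MX l a vs := by
  intro vs
  induction vs with
  | nil => intro a _; rfl
  | cons v vs ih =>
      intro a ha
      simp only [FA, MX, List.foldl_cons, contribF] at *
      by_cases hb : redF v l * 2 = cntF v l
      · simp only [if_pos hb]
        exact ih _ (le_trans ha (le_max_left _ _))
      · simp only [if_neg hb, max_eq_left ha]
        exact ih _ ha

theorem A_eq_MX (X : List Int) (Y : List Int) (colors : List String)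
    (h : Pre_solution X Y colors) :
    solution X Y colors = MX (pairsB X Y colors) 0 ((pairsB X Y colors).map (·.1)) := by
  unfold solution
  have := outerAux X Y colors h X.length le_rfl
  simp only at this
  rw [this]
  have hlen : (pairsB X Y colors).length = X.length := pairsB_length X Y colors h
  rw [← hlen, List.take_length]
  exact FA_eq_MX _ _ 0 le_rfl

theorem MX_cons (l : List (Int × Bool)) (a v : Int) (vs : List Int) :
    MX l a (v :: vs) = MX l (max a (contribF l v)) vs := rfl

theorem MX_cons_cons_same (l : List (Int × Bool)) (a v : Int) (vs : List Int) :
    MX l a (v :: v :: vs) = MX l a (v :: vs) := by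
  simp only [MX, List.foldl_cons]
  rw [max_assoc, max_self]


theorem goB_cons (p q : Int × Bool) (r : List (Int × Bool)) (cnt red ans : Int) :
    goB (p :: q :: r) cnt red ans
      = goB (q :: r) (cnt + 1) (red + if p.2 then 1 else 0)
          (if decide (q.1 ≠ p.1) = true ∧ (red + if p.2 then 1 else 0) * 2 = cnt + 1
           then max ans (cnt + 1) else ans) := rfl

theorem goB_eq (S : List (Int × Bool)) (hS : S.Pairwise (fun a b => a.1 ≤ b.1)) :
    ∀ (s P : List (Int × Bool)) (ans : Int), S = P ++ s → 0 ≤ ans →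
      goB s (P.length : Int) ((P.countP (fun p => p.2) : Int)) ans
        = MX S ans (s.map (fun p => p.1)) := by
  intro s
  induction s with
  | nil => intro P ans _ _; simp [goB, MX]
  | cons p r ih =>
      intro P ans hSe hans
      have hsplit := List.pairwise_append.mp (hSe ▸ hS)
      have hP : ∀ a ∈ P, a.1 ≤ p.1 := fun a ha => hsplit.2.2 a ha p List.mem_cons_self
      have hpr : ∀ b ∈ r, p.1 ≤ b.1 := (List.pairwise_cons.mp hsplit.2.1).1
      have hrP : r.Pairwise (fun a b => a.1 ≤ b.1) := (List.pairwise_cons.mp hsplit.2.1).2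
      have hSe' : S = (P ++ [p]) ++ r := by rw [hSe]; simp
      have hcnt : (P.length : Int) + 1 = ((P ++ [p]).length : Int) := by
        push_cast [List.length_append, List.length_cons, List.length_nil]; ring
      have hred : (P.countP (fun p => p.2) : Int) + (if p.2 then 1 else 0)
          = (((P ++ [p]).countP (fun p => p.2) : Int)) := by
        rw [List.countP_append]
        by_cases hp : p.2 <;> simp [hp]
      have hkey : ∀ (hstrict : ∀ b ∈ r, p.1 < b.1),
          cntF p.1 S = ((P ++ [p]).length : Int)
            ∧ redF p.1 S = (((P ++ [p]).countP (fun p => p.2) : Int)) := by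
        intro hstrict
        have e1 : P.countP (fun x => decide (x.1 ≤ p.1)) = P.length :=
          List.countP_eq_length.mpr (fun a ha => by simpa using hP a ha)
        have e2 : r.countP (fun x => decide (x.1 ≤ p.1)) = 0 :=
          List.countP_eq_zero.mpr (fun b hb => by
            simp only [decide_eq_true_eq]
            exact not_le.mpr (hstrict b hb))
        have e3 : P.countP (fun x => decide (x.1 ≤ p.1) && x.2) = P.countP (fun p => p.2) :=
          List.countP_congr (fun a ha => by simp [hP a ha])
        have e4 : r.countP (fun x => decide (x.1 ≤ p.1) && x.2) = 0 :=
          List.countP_eq_zero.mpr (fun b hb => by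
            simp only [Bool.and_eq_true, decide_eq_true_eq, not_and]
            intro hle
            exact absurd hle (not_le.mpr (hstrict b hb)))
        constructor
        · rw [hSe]
          simp only [cntF, List.countP_append, List.countP_cons, List.countP_nil, e1, e2]
          simp [List.length_append]
        · rw [hSe]
          simp only [redF, List.countP_append, List.countP_cons, List.countP_nil, e3, e4]
          by_cases hp : p.2 <;>
            simp [List.countP_append, List.countP_cons, hp]
      cases r with
      | nil =>
          have hk := hkey (by intro b hb; cases hb)
          simp only [goB, List.map_cons, List.map_nil]
          rw [MX_cons]
          simp only [contribF, hk.1, hk.2, MX, List.foldl_nil, hcnt, hred, decide_true, true_and]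
          split_ifs <;> simp [max_eq_left hans]
      | cons q r' =>
          by_cases hb : q.1 = p.1
          · -- not a boundary: the next key is equal, no candidate evaluated here
            have hbf : (decide (q.1 ≠ p.1)) = false := by simp [hb]
            rw [goB_cons]
            simp only [hbf, Bool.false_eq_true, false_and, if_false, List.map_cons]
            rw [hcnt, hred, ih (P ++ [p]) ans hSe' hans]
            simp only [List.map_cons]
            rw [show p.1 = q.1 from hb.symm]
            exact (MX_cons_cons_same S ans q.1 (r'.map (fun p => p.1))).symm
          · -- boundary: all later keys are strictly larger
            have hstrict : ∀ b ∈ q :: r', p.1 < b.1 := by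
              intro b hbmem
              rcases List.mem_cons.mp hbmem with hbq | hbr
              · subst hbq
                exact lt_of_le_of_ne (hpr b List.mem_cons_self) (fun e => hb e.symm)
              · have h1 : p.1 < q.1 :=
                  lt_of_le_of_ne (hpr q List.mem_cons_self) (fun e => hb e.symm)
                have h2 : q.1 ≤ b.1 := (List.pairwise_cons.mp hrP).1 b hbr
                omega
            have hk := hkey hstrict
            have hbt : (decide (q.1 ≠ p.1)) = true := by simp [hb]
            rw [goB_cons]
            simp only [hbt, true_and, List.map_cons]
            rw [MX_cons]
            simp only [contribF, hk.1, hk.2, hcnt, hred]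
            by_cases hbal : (((P ++ [p]).countP (fun p => p.2) : Int)) * 2 = ((P ++ [p]).length : Int)
            · simp only [if_pos hbal]
              rw [ih (P ++ [p]) (max ans ((P ++ [p]).length : Int)) hSe'
                (le_trans hans (le_max_left _ _))]
              simp only [List.map_cons]
            · simp only [if_neg hbal, max_eq_left hans]
              rw [ih (P ++ [p]) ans hSe' hans]
              simp only [List.map_cons]

theorem B_eq_MX (X : List Int) (Y : List Int) (colors : List String) :
    solution_alt X Y colors
      = MX (PySem.List.sorted (pairsB X Y colors) (fun p => p.1) false) 0
          ((PySem.List.sorted (pairsB X Y colors) (fun p => p.1) false).map (·.1)) := by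
  unfold solution_alt
  exact goB_eq _ (PySem.List.sorted_pairwise _ _) _ [] 0 rfl le_rfl

theorem MX_congr (l1 l2 : List (Int × Bool)) (hp : l1.Perm l2) (a : Int) (vs : List Int) :
    MX l1 a vs = MX l2 a vs := by
  induction vs generalizing a with
  | nil => rfl
  | cons v vs ih =>
      simp only [MX, List.foldl] at *
      rw [show contribF l1 v = contribF l2 v by
        simp [contribF, cntF, redF, hp.countP_eq], ih]

theorem MX_perm (l : List (Int × Bool)) (a : Int) (vs ws : List Int) (hp : vs.Perm ws) :
    MX l a vs = MX l a ws := by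
  unfold MX
  exact @List.Perm.foldl_eq _ _ (fun a v => max a (contribF l v)) _ _
    ⟨fun b a₁ a₂ => by simp only [max_right_comm]⟩ hp a

-- ===== VERDICT (by name: the statement is the Claim_ definition above) =====
theorem solution_spec : Claim_equal_solution := by
  intro X Y colors _ hpre
  unfold Spec_solution
  rw [A_eq_MX X Y colors hpre, B_eq_MX X Y colors]
  rw [MX_congr _ _ (PySem.List.sorted_perm _ _ _) 0]
  exact MX_perm _ 0 _ _ (((PySem.List.sorted_perm (pairsB X Y colors) (fun p => p.1) false).map (·.1)).symm)
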